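-- pv_equiv track=rewrite | github.com/alexandraback/datacollection | solutions_5738606668808192_0/Python/bIgInNnNeR/c.py | check
-- ===== SOURCE A (Python) =====
-- def check(x):
--     alc = 0
--     idx = 0
--     while (1 << idx) <= x:
--         if x & (1 << idx):
--             alc += 1 - 2 * (idx & 1)
--         idx += 1
--     return alc == 0
-- ===== SOURCE B (Python) =====
-- def check(x):
--     # Alternating bit sum via recursion: the sign flip for odd positions
--     # comes from negating the recursive result, no index or counters needed.
--     def diff(x):
--         if x <= 0:
--             return 0
--         return (x & 1) - diff(x >> 1)
--     return diff(x) == 0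
-- ===== Notes on version B (the rewrite author's own statement) =====
-- stated objective: simpler
-- what changed: B replaces A's indexed loop (growing power-of-two masks and a parity-signed accumulator) by a short recursion computing the alternating bit sum directly: diff(x) = (x&1) - diff(x>>1), so the alternation comes from negating the recursive call and no index, masks or parity bookkeeping exist.
import Mathlib
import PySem

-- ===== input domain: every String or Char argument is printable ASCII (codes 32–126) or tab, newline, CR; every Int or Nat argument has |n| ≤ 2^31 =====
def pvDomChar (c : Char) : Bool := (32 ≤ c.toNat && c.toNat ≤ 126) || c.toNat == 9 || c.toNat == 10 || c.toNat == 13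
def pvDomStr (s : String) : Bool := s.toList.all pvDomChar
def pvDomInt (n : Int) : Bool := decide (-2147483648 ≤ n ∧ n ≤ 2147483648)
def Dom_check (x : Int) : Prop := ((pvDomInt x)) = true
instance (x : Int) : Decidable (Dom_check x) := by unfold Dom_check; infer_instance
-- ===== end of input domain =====

-- B replaces A's indexed mask-and-signed-accumulator loop by a direct recursion on the
-- bits, diff(x) = (x&1) - diff(x>>1); objective: simpler. Proved equivalent on all inputs.

-- ===== PORT A =====
-- while (1 << idx) <= x: if x & (1 << idx): alc += 1 - 2*(idx & 1); idx += 1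
def checkLoop (x : Int) (alc : Int) (idx : Nat) : Bool :=
  if (1 : Int) <<< idx ≤ x then
    checkLoop x
      (if PySem.Int.band x ((1 : Int) <<< idx) ≠ 0 then
        alc + (1 - 2 * ((idx &&& 1 : Nat) : Int))
      else alc)
      (idx + 1)
  else
    alc == 0
termination_by x.toNat + 1 - idx
decreasing_by
  rename_i h
  have h1 : ((2 ^ idx : Nat) : Int) ≤ x := by
    simpa [Int.shiftLeft_eq] using h
  have h2 : (2 ^ idx : Nat) ≤ x.toNat := by omega
  have h3 : idx < 2 ^ idx := Nat.lt_two_pow_self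
  omega

def check (x : Int) : Bool := checkLoop x 0 0

-- ===== PORT B =====
-- def diff(x): return 0 if x <= 0 else (x & 1) - diff(x >> 1)
def diffRec (x : Int) : Int :=
  if x ≤ 0 then 0
  else PySem.Int.band x 1 - diffRec (x >>> (1 : Nat))
termination_by x.toNat
decreasing_by
  rename_i h
  have e1 : x >>> (1 : Nat) = x / 2 := by simp [Int.shiftRight_eq_div_pow]
  rw [e1]
  omega

-- return diff(x) == 0
def check_alt (x : Int) : Bool := diffRec x == 0

-- ===== PRECONDITION & SPEC =====
def Spec_check (x : Int) (out : Bool) : Prop := out = check_alt x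
instance (x : Int) (out : Bool) : Decidable (Spec_check x out) := by unfold Spec_check; infer_instance

-- ===== CLAIM (what is proved, stated in full; the proofs are below) =====
def Claim_equal_check : Prop := ∀ (x : Int), Dom_check x → Spec_check x (check x)

-- ===== LEMMAS AND PROOFS =====

-- alternating bit sum: bit0 - bit1 + bit2 - …
def altSum (n : Nat) : Int :=
  if n = 0 then 0 else (n % 2 : Int) - altSum (n / 2)
termination_by n
decreasing_by omega

theorem altSum_step (n : Nat) : altSum n = (n % 2 : Int) - altSum (n / 2) := by
  rw [altSum]
  split
  · subst ‹n = 0›; rw [altSum]; simp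
  · rfl

theorem checkLoop_eq (x alc : Int) (idx : Nat) :
    checkLoop x alc idx =
      ((alc + (if idx % 2 = 0 then 1 else -1) * altSum (x.toNat >>> idx)) == 0) := by
  fun_induction checkLoop x alc idx with
  | case1 alc idx h ih =>
    have hpow : (1 : Int) <<< idx = ((2 ^ idx : Nat) : Int) := by
      simp [Int.shiftLeft_eq]
    have hx2 : ((2 ^ idx : Nat) : Int) ≤ x := hpow ▸ h
    have hx0 : (0 : Int) ≤ x := le_trans (Int.natCast_nonneg _) hx2
    have hxnn : x = (x.toNat : Int) := by omega
    have hmdef : x.toNat >>> idx = x.toNat / 2 ^ idx := Nat.shiftRight_eq_div_pow _ _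
    have hsucc : x.toNat >>> (idx + 1) = (x.toNat >>> idx) / 2 := Nat.shiftRight_succ _ _
    have hband : PySem.Int.band x ((1 : Int) <<< idx) = ((x.toNat &&& 2 ^ idx : Nat) : Int) := by
      rw [hpow]; rw [hxnn]
      exact_mod_cast PySem.Int.band_natCast _ _
    have hbit : (x.toNat &&& 2 ^ idx) ≠ 0 ↔ (x.toNat >>> idx) % 2 = 1 := by
      rw [Nat.and_two_pow, hmdef, Nat.testBit_eq_decide_div_mod_eq]
      by_cases hb : x.toNat / 2 ^ idx % 2 = 1 <;> simp [hb]
    have hstep := altSum_step (x.toNat >>> idx)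
    have hidx1 : (idx &&& 1 : Nat) = idx % 2 := Nat.and_one_is_mod idx
    have hcast : ((x.toNat &&& 2 ^ idx : Nat) : Int) ≠ 0 ↔ (x.toNat &&& 2 ^ idx) ≠ 0 := by
      exact_mod_cast Int.natCast_ne_zero
    simp only [dite_eq_ite] at ih
    rw [ih, hband, hsucc]
    rw [Bool.eq_iff_iff]
    simp only [beq_iff_eq, hidx1, hstep]
    have hpar : (idx + 1) % 2 = 1 - idx % 2 := by omega
    rw [hpar]
    generalize altSum ((x.toNat >>> idx) / 2) = t
    generalize hmm : x.toNat >>> idx = m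
    rw [hmm] at hbit
    have hi2 : idx % 2 = 0 ∨ idx % 2 = 1 := by omega
    by_cases hb : (x.toNat &&& 2 ^ idx) ≠ 0
    · rw [if_pos (hcast.mpr hb)]
      have hb1 : m % 2 = 1 := hbit.mp hb
      have hb1' : (m : Int) % 2 = 1 := by omega
      rcases hi2 with hi | hi <;> simp [hi, hb1'] <;> constructor <;> intro <;> omega
    · rw [if_neg (fun hc => hb (hcast.mp hc))]
      have hb0 : m % 2 = 0 := by
        have := hbit.not.mp hb
        omega
      have hb0' : (m : Int) % 2 = 0 := by omega
      rcases hi2 with hi | hi <;> simp [hi, hb0']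
  | case2 alc idx h =>
    have hpow : (1 : Int) <<< idx = ((2 ^ idx : Nat) : Int) := by
      simp [Int.shiftLeft_eq]
    have h1 : x < ((2 ^ idx : Nat) : Int) := not_le.mp (hpow ▸ h)
    have hlt : x.toNat < 2 ^ idx := by
      by_cases hx : 0 ≤ x
      · exact_mod_cast (Int.toNat_of_nonneg hx) ▸ h1
      · have h0 : x.toNat = 0 := by omega
        rw [h0]; exact Nat.two_pow_pos idx
    have h2 : x.toNat >>> idx = 0 := by
      rw [Nat.shiftRight_eq_div_pow]
      exact Nat.div_eq_of_lt hlt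
    rw [h2, altSum, if_pos rfl]
    split <;> simp

theorem diffRec_eq (x : Int) : diffRec x = altSum x.toNat := by
  fun_induction diffRec x with
  | case1 x h =>
    have h0 : x.toNat = 0 := by omega
    rw [h0, altSum, if_pos rfl]
  | case2 x h ih =>
    have hx : x = (x.toNat : Int) := by omega
    have hb : PySem.Int.band x 1 = ((x.toNat &&& 1 : Nat) : Int) := by
      rw [hx]; exact_mod_cast PySem.Int.band_natCast _ 1
    have hs : x >>> (1 : Nat) = ((x.toNat >>> 1 : Nat) : Int) := by
      rw [hx]; exact_mod_cast (Int.natCast_shiftRight _ _).symm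
    rw [hs] at ih
    rw [hb, hs, ih]
    rw [altSum_step x.toNat]
    simp only [Int.toNat_natCast]
    rw [Nat.and_one_is_mod, Nat.shiftRight_succ, Nat.shiftRight_zero]
    push_cast
    ring

theorem check_eq_altSum (x : Int) : check x = (altSum x.toNat == 0) := by
  rw [check, checkLoop_eq]
  norm_num

-- ===== VERDICT (by name: the statement is the Claim_ definition above) =====
theorem check_spec : Claim_equal_check := by
  intro x _
  unfold Spec_check
  rw [check_eq_altSum, check_alt, diffRec_eq]
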